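-- pv_equiv track=rewrite | github.com/yxw-11/TabLaP | wtq/build_training_data.py | filter_reason
-- ===== SOURCE A (Python) =====
-- def filter_reason(pair):
--     answer = pair[-1][0]
--     answer = "Final Answer: " + answer
--     inst = ""
--     for text in pair[:-1]:
--         if text.startswith("To") and answer in text:
--             return text
--         elif answer in text:
--             inst = text
--         else:
--             continue
--     if inst:
--         return inst
--     return pair[0]
-- ===== SOURCE B (Python) =====
-- def filter_reason(pair):
--     answer = "Final Answer: " + pair[-1][0]
--     body = pair[:-1]
--     for text in body:
--         if text.startswith("To") and answer in text:
--             return text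
--     for text in reversed(body):
--         if answer in text:
--             return text
--     return pair[0]
-- ===== Notes on version B (the rewrite author's own statement) =====
-- stated objective: simpler
-- what changed: Replaced the single loop with a last-write-wins 'inst' accumulator and early return by two stateless scans: a forward scan for the first 'To...' text containing the answer, then a reverse scan for the last text containing the answer, else pair[0].
import Mathlib
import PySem

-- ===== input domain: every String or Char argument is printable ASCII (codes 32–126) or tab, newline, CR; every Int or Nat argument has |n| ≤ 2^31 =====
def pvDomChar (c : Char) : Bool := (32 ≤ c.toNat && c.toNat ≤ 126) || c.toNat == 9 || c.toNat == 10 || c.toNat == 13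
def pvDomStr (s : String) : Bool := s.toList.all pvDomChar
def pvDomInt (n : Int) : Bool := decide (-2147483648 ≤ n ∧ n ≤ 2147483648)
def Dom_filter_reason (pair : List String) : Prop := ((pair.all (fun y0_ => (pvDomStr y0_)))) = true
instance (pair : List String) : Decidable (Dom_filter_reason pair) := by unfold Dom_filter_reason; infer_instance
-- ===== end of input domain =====

-- B replaces A's single loop with last-write-wins accumulator by two stateless scans
-- (forward scan for the first "To…"+answer text, reverse scan for the last answer text); same cost, simpler.

-- ===== PORT A =====
-- the loop over pair[:-1] with the 'inst' accumulator, followed by 'if inst: return inst; return pair[0]'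
def filterA_loop (answer pair0 : String) : List String → String → String
  | [], inst => if inst ≠ "" then inst else pair0
  | t :: ts, inst =>
    if PySem.Str.startswith t "To" && PySem.Str.isIn answer t then t
    else if PySem.Str.isIn answer t then filterA_loop answer pair0 ts t
    else filterA_loop answer pair0 ts inst

def filter_reason (pair : List String) : String :=
  match PySem.List.pyGet? pair (-1) with
  | none => ""                    -- pair[-1] raises IndexError; excluded by Pre_
  | some last =>
    match PySem.Str.pyGet? last 0 with
    | none => ""                  -- (pair[-1])[0] raises IndexError; excluded by Pre_
    | some c =>
      let answer := "Final Answer: " ++ String.singleton c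
      filterA_loop answer (pair.headD "") (PySem.List.slice pair none (some (-1))) ""

-- ===== PORT B =====
def filter_reason_alt (pair : List String) : String :=
  match PySem.List.pyGet? pair (-1) with
  | none => ""                    -- same IndexError cases, excluded by Pre_
  | some last =>
    match PySem.Str.pyGet? last 0 with
    | none => ""
    | some c =>
      let answer := "Final Answer: " ++ String.singleton c
      let body := PySem.List.slice pair none (some (-1))
      match body.find? (fun t => PySem.Str.startswith t "To" && PySem.Str.isIn answer t) with
      | some t => t
      | none =>
        match body.reverse.find? (fun t => PySem.Str.isIn answer t) with
        | some t => t
        | none => pair.headD ""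

-- ===== PRECONDITION & SPEC =====
-- A raises IndexError on the empty list and when the last string is empty (pair[-1][0]); Pre_ excludes exactly those.
def Pre_filter_reason (pair : List String) : Prop := pair ≠ [] ∧ pair.getLastD "" ≠ ""
instance (pair : List String) : Decidable (Pre_filter_reason pair) := by unfold Pre_filter_reason; infer_instance
def pvWitness_filter_reason : List String := ["To solve: Final Answer: 4", "4"]

def Spec_filter_reason (pair : List String) (out : String) : Prop := out = filter_reason_alt pair
instance (pair : List String) (out : String) : Decidable (Spec_filter_reason pair out) := by unfold Spec_filter_reason; infer_instance

-- ===== CLAIM (what is proved, stated in full; the proofs are below) =====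
def Claim_equal_filter_reason : Prop := ∀ (pair : List String), Dom_filter_reason pair → Pre_filter_reason pair → Spec_filter_reason pair (filter_reason pair)

-- ===== LEMMAS AND PROOFS =====

lemma find?_cons_if {α : Type} (p : α → Bool) (a : α) (l : List α) :
    List.find? p (a :: l) = if p a then some a else List.find? p l := by
  rw [List.find?_cons]; split <;> simp_all

lemma isIn_ne_empty {answer t : String} (ha : answer ≠ "") (h : PySem.Str.isIn answer t = true) :
    t ≠ "" := by
  intro ht
  subst ht
  rw [PySem.Str.isIn_iff_infix] at h
  have h0 : answer.toList = [] := by simpa using h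
  exact ha (by simpa using congrArg String.ofList h0)

lemma answer_ne_empty (c : Char) : ("Final Answer: " ++ String.singleton c) ≠ "" := by
  intro h
  have h0 := congrArg String.toList h
  simp at h0

lemma filterA_loop_eq (answer pair0 : String) (ha : answer ≠ "") :
    ∀ (ts : List String) (inst : String),
    filterA_loop answer pair0 ts inst =
      match ts.find? (fun t => PySem.Str.startswith t "To" && PySem.Str.isIn answer t) with
      | some t => t
      | none =>
        match ts.reverse.find? (fun t => PySem.Str.isIn answer t) with
        | some t => t
        | none => if inst ≠ "" then inst else pair0 := by
  intro ts
  induction ts with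
  | nil => intro inst; simp only [filterA_loop, List.find?_nil, List.reverse_nil]
  | cons t ts ih =>
    intro inst
    simp only [filterA_loop]
    rw [find?_cons_if, List.reverse_cons, List.find?_append, find?_cons_if, List.find?_nil]
    by_cases h1 : (PySem.Str.startswith t "To" && PySem.Str.isIn answer t) = true
    · rw [if_pos h1, if_pos h1]
    · rw [if_neg h1, if_neg h1]
      by_cases h2 : PySem.Str.isIn answer t = true
      · rw [if_pos h2, if_pos h2, ih t]
        cases hf : ts.find? (fun t => PySem.Str.startswith t "To" && PySem.Str.isIn answer t) with
        | some u => rfl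
        | none =>
          cases hr : ts.reverse.find? (fun t => PySem.Str.isIn answer t) with
          | some u => rfl
          | none => rw [if_pos (isIn_ne_empty ha h2)]; rfl
      · rw [if_neg h2, if_neg h2, ih inst, Option.or_none]

-- ===== VERDICT (by name: the statement is the Claim_ definition above) =====
theorem filter_reason_spec : Claim_equal_filter_reason := by
  intro pair _ _
  unfold Spec_filter_reason filter_reason filter_reason_alt
  cases hg : PySem.List.pyGet? pair (-1) with
  | none => rfl
  | some last =>
    dsimp only
    cases hc : PySem.Str.pyGet? last 0 with
    | none => rfl
    | some c =>
      dsimp only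
      rw [filterA_loop_eq _ _ (answer_ne_empty c)]
      cases (PySem.List.slice pair none (some (-1))).find?
          (fun t => PySem.Str.startswith t "To" && PySem.Str.isIn ("Final Answer: " ++ String.singleton c) t) with
      | some u => rfl
      | none =>
        cases (PySem.List.slice pair none (some (-1))).reverse.find?
            (fun t => PySem.Str.isIn ("Final Answer: " ++ String.singleton c) t) with
        | some u => rfl
        | none => simp
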